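-- pv_equiv track=rewrite | github.com/nataszczypiora/- | main.py | search_full_join_antipattern
-- ===== SOURCE A (Python) =====
-- def search_full_join_antipattern(tokens):
--     is_full_join = False
--     for i in range(0, len(tokens) - 1):
--         if tokens[i] == 'FULL' and tokens[i+1] == 'JOIN':
--             is_full_join = True
--         if tokens[i:i+3] == ['VARIABLE', 'EQUAL', 'VARIABLE'] and is_full_join:
--             return True
--
--
--     return False
-- ===== SOURCE B (Python) =====
-- def search_full_join_antipattern(tokens):
--     n = len(tokens)
--     join_at = None
--     for i in range(n - 1):
--         if tokens[i] == 'FULL' and tokens[i + 1] == 'JOIN':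
--             join_at = i
--             break
--     if join_at is None:
--         return False
--     for i in range(join_at, n - 2):
--         if tokens[i] == 'VARIABLE' and tokens[i + 1] == 'EQUAL' and tokens[i + 2] == 'VARIABLE':
--             return True
--     return False
-- ===== Notes on version B (the rewrite author's own statement) =====
-- stated objective: alternative
-- what changed: Replaces the single scan with a latched boolean flag and per-step list-slice comparison by a find-then-search decomposition: one loop locates the first adjacent FULL,JOIN pair and breaks, a second loop starting at that index checks the three tokens directly; no flag and no slice allocation.
import Mathlib
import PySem

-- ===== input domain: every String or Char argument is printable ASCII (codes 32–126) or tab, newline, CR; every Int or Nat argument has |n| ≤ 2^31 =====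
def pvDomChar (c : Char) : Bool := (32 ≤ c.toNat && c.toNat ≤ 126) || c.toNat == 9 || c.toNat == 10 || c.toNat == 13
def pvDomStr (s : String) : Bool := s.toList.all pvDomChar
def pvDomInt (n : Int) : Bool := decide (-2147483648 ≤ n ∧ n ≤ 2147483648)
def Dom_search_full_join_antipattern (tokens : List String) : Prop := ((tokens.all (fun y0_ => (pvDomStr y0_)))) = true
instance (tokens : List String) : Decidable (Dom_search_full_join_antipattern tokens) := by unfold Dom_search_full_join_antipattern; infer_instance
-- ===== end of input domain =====

-- B replaces A's single scan with a latched flag and a slice comparison by a find-then-search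
-- decomposition: locate the first adjacent FULL,JOIN pair, then scan from there for the triple.

-- ===== PORT A =====
-- the for-loop of A: state is the latched flag 'is_full_join', iterated over the range indices
def pvA_loop (tokens : List String) : Bool → List Int → Bool
  | _, [] => false
  | flag, i :: rest =>
    let flag' := if PySem.List.pyGet? tokens i = some "FULL" ∧
                    PySem.List.pyGet? tokens (i + 1) = some "JOIN" then true else flag
    if PySem.List.slice tokens (some i) (some (i + 3)) = ["VARIABLE", "EQUAL", "VARIABLE"] ∧ flag' = true
    then true
    else pvA_loop tokens flag' rest

def search_full_join_antipattern (tokens : List String) : Bool :=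
  pvA_loop tokens false (PySem.List.pyRange 0 ((tokens.length : Int) - 1) 1)

-- ===== PORT B =====
-- first loop of B: index of the first adjacent 'FULL','JOIN' pair (break = return of the Option)
def pvB_find (tokens : List String) : List Int → Option Int
  | [] => none
  | i :: rest =>
    if PySem.List.pyGet? tokens i = some "FULL" ∧ PySem.List.pyGet? tokens (i + 1) = some "JOIN"
    then some i
    else pvB_find tokens rest

-- second loop of B: any 'VARIABLE','EQUAL','VARIABLE' triple starting in the given index range
def pvB_scan (tokens : List String) : List Int → Bool
  | [] => false
  | i :: rest =>
    if PySem.List.pyGet? tokens i = some "VARIABLE" ∧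
       PySem.List.pyGet? tokens (i + 1) = some "EQUAL" ∧
       PySem.List.pyGet? tokens (i + 2) = some "VARIABLE"
    then true
    else pvB_scan tokens rest

def search_full_join_antipattern_alt (tokens : List String) : Bool :=
  let n : Int := tokens.length
  match pvB_find tokens (PySem.List.pyRange 0 (n - 1) 1) with
  | none => false
  | some j => pvB_scan tokens (PySem.List.pyRange j (n - 2) 1)

-- ===== PRECONDITION & SPEC =====
def Spec_search_full_join_antipattern (tokens : List String) (out : Bool) : Prop := out = search_full_join_antipattern_alt tokens
instance (tokens : List String) (out : Bool) : Decidable (Spec_search_full_join_antipattern tokens out) := by unfold Spec_search_full_join_antipattern; infer_instance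

-- ===== CLAIM (what is proved, stated in full; the proofs are below) =====
def Claim_equal_search_full_join_antipattern : Prop := ∀ (tokens : List String), Dom_search_full_join_antipattern tokens → Spec_search_full_join_antipattern tokens (search_full_join_antipattern tokens)

-- ===== LEMMAS AND PROOFS =====

-- a successful find returns a member of the index list
theorem pvB_find_mem (tokens : List String) (L : List Int) (j : Int)
    (h : pvB_find tokens L = some j) : j ∈ L := by
  induction L with
  | nil => simp [pvB_find] at h
  | cons i rest ih =>
    rw [pvB_find] at h
    split at h
    · simp at h; simp [h]
    · exact List.mem_cons_of_mem _ (ih h)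

-- a 3-slice equals a 3-list iff the three indexed lookups hit those values
theorem slice3_iff (xs : List String) (i : Int) (hi : 0 ≤ i) (x y z : String) :
    (PySem.List.slice xs (some i) (some (i + 3)) = [x, y, z]) ↔
      (PySem.List.pyGet? xs i = some x ∧ PySem.List.pyGet? xs (i + 1) = some y ∧
       PySem.List.pyGet? xs (i + 2) = some z) := by
  rw [PySem.List.slice_toNat xs hi (by omega)]
  rw [PySem.List.pyGet?_of_nonneg xs hi, PySem.List.pyGet?_of_nonneg xs (by omega : (0:Int) ≤ i + 1),
      PySem.List.pyGet?_of_nonneg xs (by omega : (0:Int) ≤ i + 2)]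
  have h1 : (i + 1).toNat = i.toNat + 1 := by omega
  have h2 : (i + 2).toNat = i.toNat + 2 := by omega
  have h3 : (i + 3).toNat - i.toNat = 3 := by omega
  rw [h1, h2, h3]
  have hg0 : xs[i.toNat]? = (xs.drop i.toNat)[0]? := by rw [List.getElem?_drop]; simp
  have hg1 : xs[i.toNat + 1]? = (xs.drop i.toNat)[1]? := by rw [List.getElem?_drop]
  have hg2 : xs[i.toNat + 2]? = (xs.drop i.toNat)[2]? := by rw [List.getElem?_drop]
  rw [hg0, hg1, hg2]
  generalize xs.drop i.toNat = l
  match l with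
  | [] => simp
  | [a] => simp
  | [a, b] => simp
  | a :: b :: c :: t => simp [List.take]

-- A's loop with the flag still false = find the first pair, then continue with the flag latched
theorem pvA_find_split (tokens : List String) :
    ∀ (fuel : Nat) (a b : Int), (b - a).toNat = fuel →
    pvA_loop tokens false (PySem.List.pyRange a b 1) =
      (match pvB_find tokens (PySem.List.pyRange a b 1) with
       | none => false
       | some j => pvA_loop tokens true (PySem.List.pyRange j b 1)) := by
  intro fuel
  induction fuel with
  | zero =>
    intro a b h
    rw [PySem.List.pyRange_one_eq_nil (by omega)]
    rfl
  | succ k ih =>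
    intro a b h
    have hab : a < b := by omega
    rw [PySem.List.pyRange_one_cons hab]
    by_cases hp : PySem.List.pyGet? tokens a = some "FULL" ∧
        PySem.List.pyGet? tokens (a + 1) = some "JOIN"
    · simp only [pvA_loop, pvB_find, if_pos hp]
      rw [PySem.List.pyRange_one_cons hab]
      simp only [pvA_loop, if_pos hp]
    · simp only [pvA_loop, pvB_find, if_neg hp]
      have hfalse : ¬ (PySem.List.slice tokens (some a) (some (a + 3)) = ["VARIABLE", "EQUAL", "VARIABLE"] ∧ false = true) := by
        simp
      rw [if_neg hfalse]
      exact ih (a + 1) b (by omega)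

-- A's loop with the flag latched = B's direct triple scan (over a range one element shorter:
-- at the last index n-2 the 3-slice is too short to match)
theorem pvA_scan_eq (tokens : List String) :
    ∀ (fuel : Nat) (a : Int), 0 ≤ a → ((tokens.length : Int) - 1 - a).toNat = fuel →
    pvA_loop tokens true (PySem.List.pyRange a ((tokens.length : Int) - 1) 1) =
      pvB_scan tokens (PySem.List.pyRange a ((tokens.length : Int) - 2) 1) := by
  intro fuel
  induction fuel with
  | zero =>
    intro a ha h
    rw [PySem.List.pyRange_one_eq_nil (by omega), PySem.List.pyRange_one_eq_nil (by omega)]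
    rfl
  | succ k ih =>
    intro a ha h
    have hab : a < (tokens.length : Int) - 1 := by omega
    rw [PySem.List.pyRange_one_cons hab]
    simp only [pvA_loop, ite_self]
    by_cases hs : PySem.List.slice tokens (some a) (some (a + 3)) = ["VARIABLE", "EQUAL", "VARIABLE"]
    · -- the triple matches at a: both sides return true; a is inside B's range too
      obtain ⟨hx, hy, hz⟩ := (slice3_iff tokens a ha _ _ _).mp hs
      have hlt : (a + 2).toNat < tokens.length := by
        rw [PySem.List.pyGet?_of_nonneg tokens (by omega : (0:Int) ≤ a + 2)] at hz
        exact (List.getElem?_eq_some_iff.mp hz).1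
      have hab2 : a < (tokens.length : Int) - 2 := by omega
      rw [PySem.List.pyRange_one_cons hab2, if_pos (⟨hs, trivial⟩ : _ ∧ True)]
      simp only [pvB_scan, if_pos (⟨hx, hy, hz⟩ : _ ∧ _ ∧ _)]
    · have hns : ¬ (PySem.List.slice tokens (some a) (some (a + 3)) = ["VARIABLE", "EQUAL", "VARIABLE"] ∧ True) := by
        simp [hs]
      rw [if_neg hns]
      by_cases hlast : a = (tokens.length : Int) - 2
      · rw [PySem.List.pyRange_one_eq_nil (by omega : (tokens.length : Int) - 1 ≤ a + 1),
            PySem.List.pyRange_one_eq_nil (by omega : (tokens.length : Int) - 2 ≤ a)]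
        rfl
      · have hab2 : a < (tokens.length : Int) - 2 := by omega
        rw [PySem.List.pyRange_one_cons hab2]
        have hts : ¬ (PySem.List.pyGet? tokens a = some "VARIABLE" ∧
            PySem.List.pyGet? tokens (a + 1) = some "EQUAL" ∧
            PySem.List.pyGet? tokens (a + 2) = some "VARIABLE") := by
          intro hc
          exact hs ((slice3_iff tokens a ha _ _ _).mpr hc)
        simp only [pvB_scan, if_neg hts]
        exact ih (a + 1) (by omega) (by omega)

-- ===== VERDICT (by name: the statement is the Claim_ definition above) =====
theorem search_full_join_antipattern_spec : Claim_equal_search_full_join_antipattern := by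
  intro tokens _
  unfold Spec_search_full_join_antipattern
  unfold search_full_join_antipattern search_full_join_antipattern_alt
  show pvA_loop tokens false (PySem.List.pyRange 0 ((tokens.length : Int) - 1) 1) =
    (match pvB_find tokens (PySem.List.pyRange 0 ((tokens.length : Int) - 1) 1) with
     | none => false
     | some j => pvB_scan tokens (PySem.List.pyRange j ((tokens.length : Int) - 2) 1))
  rw [pvA_find_split tokens (((tokens.length : Int) - 1 - 0).toNat) 0 ((tokens.length : Int) - 1) rfl]
  cases hf : pvB_find tokens (PySem.List.pyRange 0 ((tokens.length : Int) - 1) 1) with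
  | none => rfl
  | some j =>
    have hj : 0 ≤ j := by
      have := PySem.List.mem_pyRange_one.mp (pvB_find_mem tokens _ j hf)
      omega
    exact pvA_scan_eq tokens (((tokens.length : Int) - 1 - j).toNat) j hj rfl
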